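-- pv_equiv track=rewrite | github.com/SabrinaSagastiT/Tarea-1 | tarea1.py | sumarValoresMatriz
-- ===== SOURCE A (Python) =====
-- def sumarValoresMatriz(mat , lista):
--   suma = 0 #variable donde guardaré la suma
--   for i in range(len(lista)): #reviso cada dupla de la lista
--     if lista[i][0] in mat: #si X se ecnuentra en mat significa que existe una llave, de lo contrario se suma 0
--       for j in range(len(mat[lista[i][0]])): #reviso cada elemento de la llave
--         if lista[i][1] == mat[lista[i][0]][j][0]: #si encuentro el Y dentro de la primera posicion de alguna dupla sumamos la segunda posicion, de lo contrario sumamos 0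
--           suma += mat[lista[i][0]][j][1]
--   return suma
-- ===== SOURCE B (Python) =====
-- def sumarValoresMatriz(mat, lista):
--     # Precompute (key, first) -> sum of seconds, then answer queries by O(1) lookup.
--     idx = {}
--     for k, vs in mat.items():
--         for a, b in vs:
--             idx[(k, a)] = idx.get((k, a), 0) + b
--     total = 0
--     for x, y in lista:
--         total += idx.get((x, y), 0)
--     return total
-- ===== Notes on version B (the rewrite author's own statement) =====
-- stated objective: alternative
-- what changed: Instead of rescanning the matched key's whole value list for every query, B precomputes one dict mapping (key, first) to the sum of seconds and answers each query with a single lookup; Pre_ only excludes association lists with duplicate keys, which do not encode a Python dict.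
import Mathlib
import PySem

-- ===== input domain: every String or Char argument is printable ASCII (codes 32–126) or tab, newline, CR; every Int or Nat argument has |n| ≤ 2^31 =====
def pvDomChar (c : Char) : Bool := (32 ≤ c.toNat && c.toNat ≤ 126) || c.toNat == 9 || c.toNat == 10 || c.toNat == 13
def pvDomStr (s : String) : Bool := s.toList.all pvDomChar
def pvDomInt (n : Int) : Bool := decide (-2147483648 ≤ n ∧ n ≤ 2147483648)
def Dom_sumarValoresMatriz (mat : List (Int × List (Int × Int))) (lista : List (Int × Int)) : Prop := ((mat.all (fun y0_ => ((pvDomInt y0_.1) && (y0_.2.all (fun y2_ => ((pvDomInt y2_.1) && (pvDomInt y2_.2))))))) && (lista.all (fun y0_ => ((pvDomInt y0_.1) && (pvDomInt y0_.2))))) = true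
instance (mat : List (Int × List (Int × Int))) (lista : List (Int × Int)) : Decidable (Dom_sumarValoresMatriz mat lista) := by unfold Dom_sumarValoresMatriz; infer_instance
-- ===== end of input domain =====

-- B precomputes one dict (key, first) ↦ sum of seconds and answers each query by a single lookup
-- instead of rescanning the matched key's value list for every query (alternative algorithm).

-- ===== PORT A =====
-- literal port: for each query, membership test in the dict, then a scan of mat[x] summing matches
def sumarValoresMatriz (mat : List (Int × List (Int × Int))) (lista : List (Int × Int)) : Int :=
  lista.foldl (fun suma q =>
    if (PySem.Dict.mk mat).contains q.1 then
      ((PySem.Dict.mk mat).getD q.1 []).foldl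
        (fun s p => if q.2 = p.1 then s + p.2 else s) suma
    else suma) 0

-- ===== PORT B =====
-- the precomputed index: (key, first) ↦ sum of seconds
def pvIdx (mat : List (Int × List (Int × Int))) : PySem.Dict (Int × Int) Int :=
  mat.foldl (fun d kv =>
    kv.2.foldl (fun d p => d.modify (kv.1, p.1) 0 (· + p.2)) d) PySem.Dict.empty

def sumarValoresMatriz_alt (mat : List (Int × List (Int × Int))) (lista : List (Int × Int)) : Int :=
  lista.foldl (fun total q => total + (pvIdx mat).getD q 0) 0

-- ===== PRECONDITION & SPEC =====
-- Pre_ excludes association lists with duplicate keys: in Python 'mat' is a dict, whose keys are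
-- unique, so such lists do not encode any Python input of A.
def Pre_sumarValoresMatriz (mat : List (Int × List (Int × Int))) (lista : List (Int × Int)) : Prop :=
  (mat.map Prod.fst).Nodup
instance (mat : List (Int × List (Int × Int))) (lista : List (Int × Int)) : Decidable (Pre_sumarValoresMatriz mat lista) := by unfold Pre_sumarValoresMatriz; infer_instance

def pvWitness_sumarValoresMatriz : (List (Int × List (Int × Int))) × (List (Int × Int)) :=
  ([(1, [(2, 3), (2, 4)]), (5, [(2, 7)])], [(1, 2), (5, 2), (0, 0)])

def Spec_sumarValoresMatriz (mat : List (Int × List (Int × Int))) (lista : List (Int × Int)) (out : Int) : Prop := out = sumarValoresMatriz_alt mat lista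
instance (mat : List (Int × List (Int × Int))) (lista : List (Int × Int)) (out : Int) : Decidable (Spec_sumarValoresMatriz mat lista out) := by unfold Spec_sumarValoresMatriz; infer_instance

-- ===== CLAIM (what is proved, stated in full; the proofs are below) =====
def Claim_equal_sumarValoresMatriz : Prop := ∀ (mat : List (Int × List (Int × Int))) (lista : List (Int × Int)), Dom_sumarValoresMatriz mat lista → Pre_sumarValoresMatriz mat lista → Spec_sumarValoresMatriz mat lista (sumarValoresMatriz mat lista)

-- ===== LEMMAS AND PROOFS =====

-- the per-query value: sum of seconds in vs whose first component is y
def pvS (vs : List (Int × Int)) (y : Int) : Int :=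
  ((vs.filter (fun p => p.1 == y)).map Prod.snd).sum

theorem pvS_cons (p : Int × Int) (t : List (Int × Int)) (y : Int) :
    pvS (p :: t) y = (if p.1 = y then p.2 else 0) + pvS t y := by
  by_cases h : p.1 = y <;> simp [pvS, h]

-- inner index-building loop
theorem getD_inner (vs : List (Int × Int)) (d : PySem.Dict (Int × Int) Int) (k x y : Int) :
    (vs.foldl (fun d p => d.modify (k, p.1) 0 (· + p.2)) d).getD (x, y) 0
      = d.getD (x, y) 0 + (if k = x then pvS vs y else 0) := by
  induction vs generalizing d with
  | nil => simp [pvS]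
  | cons p t ih =>
    simp only [List.foldl_cons, ih, PySem.Dict.getD_modify, pvS_cons]
    by_cases hk : k = x
    · subst hk
      by_cases hy : p.1 = y
      · subst hy
        simp
        ring
      · have hne : ¬ ((k, y) = (k, p.1)) := by
          intro h
          exact hy (congrArg Prod.snd h).symm
        simp [hne, hy]
    · have hne : ¬ ((x, y) = (k, p.1)) := by
        intro h
        exact hk (congrArg Prod.fst h).symm
      simp [hne, hk]

-- whole index-building loop
theorem getD_outer (mat : List (Int × List (Int × Int))) (d : PySem.Dict (Int × Int) Int) (x y : Int) :
    (mat.foldl (fun d kv => kv.2.foldl (fun d p => d.modify (kv.1, p.1) 0 (· + p.2)) d) d).getD (x, y) 0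
      = d.getD (x, y) 0 + ((mat.filter (fun kv => kv.1 == x)).map (fun kv => pvS kv.2 y)).sum := by
  induction mat generalizing d with
  | nil => simp
  | cons kv t ih =>
    simp only [List.foldl_cons, ih, getD_inner, List.filter_cons]
    by_cases h : kv.1 = x
    · simp [h]
      ring
    · simp [h]

theorem getD_pvIdx (mat : List (Int × List (Int × Int))) (x y : Int) :
    (pvIdx mat).getD (x, y) 0
      = ((mat.filter (fun kv => kv.1 == x)).map (fun kv => pvS kv.2 y)).sum := by
  simpa using getD_outer mat PySem.Dict.empty x y

-- A's inner scan computes acc + pvS vs y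
theorem inner_scan (vs : List (Int × Int)) (acc y : Int) :
    vs.foldl (fun s p => if y = p.1 then s + p.2 else s) acc = acc + pvS vs y := by
  induction vs generalizing acc with
  | nil => simp [pvS]
  | cons p t ih =>
    simp only [List.foldl_cons, ih, pvS_cons]
    by_cases h : y = p.1
    · rw [if_pos h, if_pos h.symm]
      ring
    · rw [if_neg h, if_neg (fun hh => h hh.symm)]
      ring

-- under Nodup keys, the filter used by B's index is exactly the first-match lookup of A
theorem filter_eq_lookup (mat : List (Int × List (Int × Int))) (x : Int)
    (hnd : (mat.map Prod.fst).Nodup) :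
    mat.filter (fun kv => kv.1 == x)
      = match (PySem.Dict.mk mat).get? x with
        | some vs => [(x, vs)]
        | none => [] := by
  induction mat with
  | nil => rfl
  | cons kv t ih =>
    simp only [List.map_cons, List.nodup_cons] at hnd
    rw [List.filter_cons, PySem.Dict.get?_mk_cons]
    by_cases h : kv.1 = x
    · subst h
      have hft : t.filter (fun kv2 => kv2.1 == kv.1) = [] := by
        refine List.filter_eq_nil_iff.2 ?_
        intro p hp hb
        have hpk : p.1 = kv.1 := by simpa using hb
        exact hnd.1 (hpk ▸ List.mem_map_of_mem hp)
      simp [hft]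
    · have hb : (kv.1 == x) = false := by simpa using h
      simp only [hb, Bool.false_eq_true, if_false]
      exact ih hnd.2

-- per-query equality of the two step functions' contributions
theorem step_eq (mat : List (Int × List (Int × Int))) (x y : Int)
    (hnd : (mat.map Prod.fst).Nodup) :
    (if (PySem.Dict.mk mat).contains x then
        pvS ((PySem.Dict.mk mat).getD x []) y else 0)
      = (pvIdx mat).getD (x, y) 0 := by
  rw [getD_pvIdx, filter_eq_lookup mat x hnd]
  rcases hg : (PySem.Dict.mk mat).get? x with _ | vs
  · have : (PySem.Dict.mk mat).contains x = false := by
      rw [PySem.Dict.contains_eq_isSome_get?, hg]; rfl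
    simp [this]
  · have hc : (PySem.Dict.mk mat).contains x = true := by
      rw [PySem.Dict.contains_eq_isSome_get?, hg]; rfl
    simp [hc, PySem.Dict.getD_eq_get?_getD, hg]

-- both folds expressed with an explicit accumulator
theorem foldA_eq (mat : List (Int × List (Int × Int))) (lista : List (Int × Int)) (acc : Int)
    (hnd : (mat.map Prod.fst).Nodup) :
    lista.foldl (fun suma q =>
      if (PySem.Dict.mk mat).contains q.1 then
        ((PySem.Dict.mk mat).getD q.1 []).foldl
          (fun s p => if q.2 = p.1 then s + p.2 else s) suma
      else suma) acc
    = lista.foldl (fun total q => total + (pvIdx mat).getD q 0) acc := by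
  induction lista generalizing acc with
  | nil => rfl
  | cons q t ih =>
    simp only [List.foldl_cons]
    rw [← ih]
    congr 1
    by_cases hc : (PySem.Dict.mk mat).contains q.1
    · rw [if_pos hc, inner_scan]
      have := step_eq mat q.1 q.2 hnd
      rw [if_pos hc] at this
      simp [this]
    · rw [if_neg hc]
      have := step_eq mat q.1 q.2 hnd
      rw [if_neg hc] at this
      simp [← this]

-- ===== VERDICT (by name: the statement is the Claim_ definition above) =====
theorem sumarValoresMatriz_spec : Claim_equal_sumarValoresMatriz := by
  intro mat lista _ hpre
  unfold Spec_sumarValoresMatriz sumarValoresMatriz sumarValoresMatriz_alt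
  exact foldA_eq mat lista 0 hpre
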